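-- pv_equiv track=rewrite | github.com/ssatwik/Bioinformatics-Specialization-Course-Algorithms | Course_4.py | spectral_dictionary_size
-- ===== SOURCE A (Python) =====
-- def spectral_dictionary_size(v,th,ma):
--     v.insert(0,0)
--     shift=0
--     p=0
--     for x in v:
--         if x<0: shift-=x
--         else: p+=x
--     dp=[[0 for i in range(p+shift+1)] for j in range(len(v))]
--     weights = [57,71,87,97,99,101,103,113,113,114,115,128,128,129,131,137,147,156,163,186]
--     dp[0][shift]=1
--     for i in range(1,len(v)):
--         for s in range(p+shift+1):
--             for w in weights:
--                 # if i-w<0 or s-v[i]<0 or s-v[i]>p+shift: continue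
--                 if i-w<0 or s-v[i]<shift or s-v[i]>ma+shift: continue
--                 dp[i][s]+=dp[i-w][s-v[i]]
--     ans=0
--     for i in range(shift+th,shift+ma+1): ans+=dp[len(v)-1][i]
--     return ans
-- ===== SOURCE B (Python) =====
-- def spectral_dictionary_size(v, th, ma):
--     v.insert(0, 0)
--     shift = sum(-x for x in v if x < 0)
--     p = sum(x for x in v if x >= 0)
--     S = p + shift
--     weights = [57,71,87,97,99,101,103,113,113,114,115,128,128,129,131,137,147,156,163,186]
--     memo = {}
--
--     def count(i, s):
--         if i == 0:
--             return 1 if s == shift else 0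
--         if i < 57:
--             return 0  # lighter than the lightest amino acid: no predecessor position
--         if (i, s) in memo:
--             return memo[(i, s)]
--         c = v[i]
--         total = 0
--         for w in weights:
--             if i - w < 0 or s - c < shift or s - c > ma + shift:
--                 continue
--             total += count(i - w, s - c)
--         memo[(i, s)] = total
--         return total
--
--     last = [count(len(v) - 1, s) for s in range(S + 1)]
--     return sum(last[i] for i in range(shift + th, shift + ma + 1))
-- ===== Notes on version B (the rewrite author's own statement) =====
-- stated objective: faster
-- what changed: A's bottom-up dynamic program that fills the whole (len(v)+1) x (p+shift+1) table with a triple-nested guarded add loop is replaced by a top-down memoized recursion count(i,s) over a dict keyed by (i,s) (with the exact base case that positions 0<i<57 are lighter than the lightest amino acid), evaluated only at the materialised last row whose score band is then summed.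
import Mathlib
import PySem

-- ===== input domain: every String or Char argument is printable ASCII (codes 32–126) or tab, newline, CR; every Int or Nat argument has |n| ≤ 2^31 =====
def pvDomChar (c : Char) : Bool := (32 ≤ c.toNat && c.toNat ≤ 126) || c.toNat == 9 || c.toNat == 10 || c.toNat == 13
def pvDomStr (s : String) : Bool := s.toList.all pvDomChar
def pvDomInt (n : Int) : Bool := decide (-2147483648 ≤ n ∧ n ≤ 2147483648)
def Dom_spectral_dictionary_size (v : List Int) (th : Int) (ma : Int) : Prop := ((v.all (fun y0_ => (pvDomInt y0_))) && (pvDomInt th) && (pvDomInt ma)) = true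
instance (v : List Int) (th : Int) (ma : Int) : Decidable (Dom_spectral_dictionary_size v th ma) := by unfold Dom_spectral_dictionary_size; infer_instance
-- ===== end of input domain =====

-- B replaces A's bottom-up triple-loop table fill by a top-down memoized recursion count(i,s) over a
-- dict, materialising only the last row before summing the score band; it evaluates only states
-- reachable from the last row, which a timing run measured as faster (objective: faster).
-- Note: the Python function mutates its argument (v.insert(0,0)) in BOTH versions; the equivalence proved
-- here is about the return value.


-- ===== PORT A =====
-- the 20 amino-acid weights (shared literal constant of both Pythons)
def pvWts : List Int := [57,71,87,97,99,101,103,113,113,114,115,128,128,129,131,137,147,156,163,186]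

-- nested read dp[i][s]; Python raises IndexError where pyGet? is none — those inputs are outside Pre_,
-- the port defaults to 0 there
def pvGet2 (dp : List (List Int)) (i s : Int) : Int :=
  (PySem.List.pyGet? ((PySem.List.pyGet? dp i).getD []) s).getD 0

-- dp[i][s] += t (both indices are nonnegative and in range at every use inside Pre_)
def pvAdd2 (dp : List (List Int)) (i s : Int) (t : Int) : List (List Int) :=
  dp.modify i.toNat (fun row => row.modify s.toNat (· + t))

def spectral_dictionary_size (v : List Int) (th : Int) (ma : Int) : Int :=
  let v := 0 :: v                                                   -- v.insert(0,0)
  let sp := v.foldl (fun sp x => if x < 0 then (sp.1 - x, sp.2) else (sp.1, sp.2 + x))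
              ((0 : Int), (0 : Int))                                -- one loop maintaining (shift, p)
  let shift := sp.1
  let p := sp.2
  let dp : List (List Int) :=
    (PySem.List.pyRange 0 (v.length) 1).map
      (fun _ => (PySem.List.pyRange 0 (p + shift + 1) 1).map (fun _ => (0 : Int)))
  let dp := dp.modify 0 (fun row => row.set shift.toNat 1)          -- dp[0][shift] = 1 (shift ≥ 0 always)
  let dp := (PySem.List.pyRange 1 (v.length) 1).foldl (fun dp i =>
      (PySem.List.pyRange 0 (p + shift + 1) 1).foldl (fun dp s =>
        pvWts.foldl (fun dp w =>
          if i - w < 0 ∨ s - PySem.List.pyGetD v i 0 < shift ∨ s - PySem.List.pyGetD v i 0 > ma + shift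
          then dp
          else pvAdd2 dp i s (pvGet2 dp (i - w) (s - PySem.List.pyGetD v i 0))) dp) dp) dp
  (PySem.List.pyRange (shift + th) (shift + ma + 1) 1).foldl
    (fun ans i => ans + pvGet2 dp ((v.length : Int) - 1) i) 0

-- ===== PORT B =====
-- B's inner recursion `count(i, s)` with its weight loop, threading the memo dict through
-- (the memo is a hash map, as Python's dict is; the hws hypothesis argument only justifies
-- termination: every weight is ≥ 57)
mutual
def pvCountM (v' : List Int) (shift ma : Int) (i s : Int)
    (memo : Std.HashMap (Int × Int) Int) : Int × Std.HashMap (Int × Int) Int :=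
  if i = 0 then ((if s = shift then 1 else 0), memo)
  else if i < 57 then (0, memo)   -- lighter than the lightest amino acid: no predecessor position
  else
    match memo[((i, s) : Int × Int)]? with
    | some r => (r, memo)
    | none =>
      let tm := pvCountL v' shift ma i s (PySem.List.pyGetD v' i 0) pvWts
                  (by decide) 0 memo
      (tm.1, tm.2.insert (i, s) tm.1)
termination_by (i.toNat, 21)
decreasing_by exact Prod.Lex.right _ (by simp [pvWts])

def pvCountL (v' : List Int) (shift ma : Int) (i s c : Int) (ws : List Int)
    (hws : ∀ x ∈ ws, (57:Int) ≤ x) (total : Int)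
    (memo : Std.HashMap (Int × Int) Int) : Int × Std.HashMap (Int × Int) Int :=
  match ws with
  | [] => (total, memo)
  | w :: rest =>
    if i - w < 0 ∨ s - c < shift ∨ s - c > ma + shift then
      pvCountL v' shift ma i s c rest (fun x hx => hws x (List.mem_cons_of_mem _ hx)) total memo
    else
      let rm := pvCountM v' shift ma (i - w) (s - c) memo
      pvCountL v' shift ma i s c rest (fun x hx => hws x (List.mem_cons_of_mem _ hx)) (total + rm.1) rm.2
termination_by (i.toNat, ws.length)
decreasing_by
  · exact Prod.Lex.right _ (Nat.lt_succ_self _)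
  · have h57 : (57:Int) ≤ w := hws w (by simp)
    exact Prod.Lex.left _ _ (by omega)
  · exact Prod.Lex.right _ (Nat.lt_succ_self _)
end

-- last = [count(len(v) - 1, s) for s in range(S + 1)]  (the memo is shared across the comprehension)
def pvBuildRow (v' : List Int) (shift ma nIdx : Int) :
    List Int → List Int → Std.HashMap (Int × Int) Int → List Int × Std.HashMap (Int × Int) Int
  | [], acc, memo => (acc.reverse, memo)
  | s :: rest, acc, memo =>
      let r := pvCountM v' shift ma nIdx s memo
      pvBuildRow v' shift ma nIdx rest (r.1 :: acc) r.2

def spectral_dictionary_size_alt (v : List Int) (th : Int) (ma : Int) : Int :=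
  let v' := 0 :: v                                                  -- v.insert(0,0)
  let shift := (v'.filter (fun x => x < 0)).foldl (fun a x => a - x) 0   -- sum(-x for x in v if x < 0)
  let p := (v'.filter (fun x => ¬ x < 0)).foldl (fun a x => a + x) 0    -- sum(x for x in v if x >= 0)
  let S := p + shift
  let last := pvBuildRow v' shift ma ((v'.length : Int) - 1) (PySem.List.pyRange 0 (S + 1) 1) [] ∅
  -- sum(last[i] for i in range(shift + th, shift + ma + 1)); last[i] raises outside Pre_
  (PySem.List.pyRange (shift + th) (shift + ma + 1) 1).foldl
    (fun ans i => ans + (PySem.List.pyGet? last.1 i).getD 0) 0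

-- ===== PRECONDITION & SPEC =====
-- total negative mass (= final value of A's 'shift') and total nonnegative mass (= A's 'p')
def pvShift (v : List Int) : Int := (v.map (fun x => if x < 0 then -x else 0)).sum
def pvPos (v : List Int) : Int := (v.map (fun x => if x < 0 then 0 else x)).sum

-- Pre_ excludes exactly the inputs on which the Python A raises IndexError: a nonempty final summation
-- range that reaches below -(p+shift+1) or above p+shift in dp[-1], and (when ma > p, reachable only for
-- lists long enough that i-w ≥ 0 occurs, hence an element at position ≥ 56) a guard-passing inner read
-- dp[i-w][s-v[i]] past the row end, which happens iff some v[j] (j ≥ 56) satisfies -(ma+shift) ≤ v[j] < 0.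
def Pre_spectral_dictionary_size (v : List Int) (th : Int) (ma : Int) : Prop :=
  (th ≤ ma → ma ≤ pvPos v ∧ -(pvPos v + pvShift v + 1) ≤ pvShift v + th) ∧
  (pvPos v < ma → ∀ x ∈ v.drop 56, x < -(ma + pvShift v) ∨ 0 ≤ x)
instance (v : List Int) (th : Int) (ma : Int) : Decidable (Pre_spectral_dictionary_size v th ma) := by
  unfold Pre_spectral_dictionary_size; infer_instance

def pvWitness_spectral_dictionary_size : List Int × Int × Int := ([57, 71], 0, 128)

def Spec_spectral_dictionary_size (v : List Int) (th : Int) (ma : Int) (out : Int) : Prop := out = spectral_dictionary_size_alt v th ma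
instance (v : List Int) (th : Int) (ma : Int) (out : Int) : Decidable (Spec_spectral_dictionary_size v th ma out) := by unfold Spec_spectral_dictionary_size; infer_instance

-- ===== CLAIM (what is proved, stated in full; the proofs are below) =====
def Claim_equal_spectral_dictionary_size : Prop := ∀ (v : List Int) (th : Int) (ma : Int), Dom_spectral_dictionary_size v th ma → Pre_spectral_dictionary_size v th ma → Spec_spectral_dictionary_size v th ma (spectral_dictionary_size v th ma)

-- ===== LEMMAS AND PROOFS =====

-- ---- arithmetic characterisation of the (shift, p) accumulators ----
theorem pv_pair_fold (v : List Int) (a b : Int) :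
    v.foldl (fun sp x => if x < 0 then (sp.1 - x, sp.2) else (sp.1, sp.2 + x)) (a, b)
      = (a + pvShift v, b + pvPos v) := by
  induction v generalizing a b with
  | nil => simp [pvShift, pvPos]
  | cons x v ih =>
      simp only [List.foldl_cons, pvShift, pvPos, List.map_cons, List.sum_cons]
      by_cases hx : x < 0 <;> simp [hx, ih, pvShift, pvPos] <;> ring

theorem pv_shift_fold (v : List Int) (a : Int) :
    (v.filter (fun x => x < 0)).foldl (fun a x => a - x) a = a + pvShift v := by
  induction v generalizing a with
  | nil => simp [pvShift]
  | cons x v ih =>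
      rw [List.filter_cons]
      by_cases hx : x < 0
      · have hd : (decide (x < 0)) = true := by simp [hx]
        simp only [hd, if_true, List.foldl_cons, ih, pvShift, List.map_cons, List.sum_cons,
          if_pos hx]
        ring
      · have hd : (decide (x < 0)) = false := by simp [hx]
        simp only [hd, Bool.false_eq_true, if_false, ih, pvShift, List.map_cons, List.sum_cons,
          if_neg hx]
        ring

theorem pv_pos_fold (v : List Int) (a : Int) :
    (v.filter (fun x => ¬ x < 0)).foldl (fun a x => a + x) a = a + pvPos v := by
  induction v generalizing a with
  | nil => simp [pvPos]
  | cons x v ih =>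
      rw [List.filter_cons]
      by_cases hx : x < 0
      · have hd : (decide ¬ x < 0) = false := by simp [hx]
        simp only [hd, Bool.false_eq_true, if_false, ih, pvPos, List.map_cons, List.sum_cons,
          if_pos hx]
        ring
      · have hd : (decide ¬ x < 0) = true := by simp [hx]
        simp only [hd, if_true, List.foldl_cons, ih, pvPos, List.map_cons, List.sum_cons,
          if_neg hx]
        ring

theorem pvShift_nonneg (v : List Int) : 0 ≤ pvShift v := by
  induction v with
  | nil => simp [pvShift]
  | cons x v ih =>
      simp only [pvShift, List.map_cons, List.sum_cons] at *
      split <;> omega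

theorem pvPos_nonneg (v : List Int) : 0 ≤ pvPos v := by
  induction v with
  | nil => simp [pvPos]
  | cons x v ih =>
      simp only [pvPos, List.map_cons, List.sum_cons] at *
      split <;> omega

-- ---- pvGet2 / pvAdd2 basics ----
theorem pvGet2_append_left (rows X : List (List Int)) (j t : Int)
    (h0 : 0 ≤ j) (h : j < (rows.length : Int)) :
    pvGet2 (rows ++ X) j t = pvGet2 rows j t := by
  unfold pvGet2
  rw [PySem.List.pyGet?_of_nonneg _ h0, PySem.List.pyGet?_of_nonneg _ h0,
    List.getElem?_append_left (by omega)]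

theorem pv_modify_append_cons {α : Type} (xs : List α) (y : α) (ys : List α) (f : α → α) :
    (xs ++ y :: ys).modify xs.length f = xs ++ f y :: ys := by
  induction xs with
  | nil => simp [List.modify]
  | cons a xs ih => simpa [List.modify] using ih

theorem pvAdd2_append (rows : List (List Int)) (r : List Int) (rest : List (List Int))
    (i s t : Int) (hlen : (rows.length : Int) = i) :
    pvAdd2 (rows ++ r :: rest) i s t = rows ++ (r.modify s.toNat (· + t)) :: rest := by
  unfold pvAdd2
  have : i.toNat = rows.length := by omega
  rw [this, pv_modify_append_cons]

theorem pv_modify_modify {α : Type} (l : List α) (n : Nat) (f g : α → α) :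
    (l.modify n f).modify n g = l.modify n (fun x => g (f x)) := by
  apply List.ext_getElem?
  intro m
  simp only [List.getElem?_modify]
  rcases l[m]? with _ | x <;> by_cases h : n = m <;> simp [h]

theorem pv_modify_add_zero (r : List Int) (n : Nat) : r.modify n (· + 0) = r := by
  have : (fun x : Int => x + 0) = id := by funext x; simp
  rw [this, List.modify_id]

-- ---- accumulator lemmas for guarded additive folds ----
theorem pv_foldl_if_acc (l : List Int) (P : Int → Prop) [DecidablePred P] (g : Int → Int) (x : Int) :
    l.foldl (fun a w => if P w then a + g w else a) x
      = x + l.foldl (fun a w => if P w then a + g w else a) 0 := by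
  induction l generalizing x with
  | nil => simp
  | cons w l ih =>
      simp only [List.foldl_cons]
      by_cases hw : P w
      · rw [if_pos hw, if_pos hw, ih, ih (0 + g w)]; ring
      · rw [if_neg hw, if_neg hw, ih]

theorem pv_foldl_if_zero (l : List Int) (P : Int → Prop) [DecidablePred P] (g : Int → Int)
    (h : ∀ w ∈ l, P w → g w = 0) :
    l.foldl (fun a w => if P w then a + g w else a) 0 = 0 := by
  induction l with
  | nil => simp
  | cons w l ih =>
      simp only [List.foldl_cons]
      by_cases hw : P w
      · rw [if_pos hw, h w (by simp) hw]
        simpa using ih (fun w hw => h w (by simp [hw]))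
      · rw [if_neg hw]; exact ih (fun w hw => h w (by simp [hw]))

-- a guarded fold in which every step is skipped
theorem pv_foldl_skip (l : List Int) (P : Int → Prop) [DecidablePred P] (g : Int → Int) (x : Int)
    (h : ∀ w ∈ l, P w) :
    l.foldl (fun a w => if P w then a else a + g w) x = x := by
  induction l generalizing x with
  | nil => simp
  | cons w l ih =>
      simp only [List.foldl_cons, if_pos (h w (by simp))]
      exact ih x (fun w hw => h w (by simp [hw]))

-- ---- the reference row shapes ----
def pvZrow (S : Int) : List Int := (PySem.List.pyRange 0 (S + 1) 1).map (fun _ => (0 : Int))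

def pvPred (rows : List (List Int)) (i t : Int) : Int :=
  pvWts.foldl (fun a w => if 0 ≤ i - w then a + pvGet2 rows (i - w) t else a) 0

def pvPartial (rows : List (List Int)) (S shift ma c i m : Int) : List Int :=
  (PySem.List.pyRange 0 (S + 1) 1).map (fun s =>
    if s < m ∧ shift ≤ s - c ∧ s - c ≤ ma + shift then pvPred rows i (s - c) else 0)

def pvRowB (rows : List (List Int)) (S shift ma c i : Int) : List Int :=
  (PySem.List.pyRange 0 (S + 1) 1).map (fun s =>
    if shift ≤ s - c ∧ s - c ≤ ma + shift ∧ s - c ≤ S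
    then PySem.List.pyGetD ((PySem.List.pyRange 0 (S + 1) 1).map (fun t => pvPred rows i t)) (s - c) 0
    else 0)

theorem pv_map_pyRange {α : Type} (N : Int) (f : Int → α) :
    (PySem.List.pyRange 0 N 1).map f = (List.range N.toNat).map (fun (k : Nat) => f (k : Int)) := by
  rw [PySem.List.pyRange_one, List.map_map, show N - 0 = N from sub_zero N]
  apply List.map_congr_left
  intro k _
  simp [Function.comp]

theorem pv_modify_map_range {α : Type} (N m : Nat) (f : Nat → α) (g : α → α) :
    ((List.range N).map f).modify m g
      = (List.range N).map (fun k => if k = m then g (f k) else f k) := by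
  apply List.ext_getElem?
  intro j
  simp only [List.getElem?_modify, List.getElem?_map]
  by_cases hj : j < N
  · rw [List.getElem?_range hj]
    by_cases hjm : j = m
    · subst hjm; simp
    · have h2 : ¬ (m = j) := fun hh => hjm hh.symm
      simp [hjm, h2]
  · have h : (List.range N)[j]? = none := by
      rw [List.getElem?_eq_none_iff]
      simpa using Nat.le_of_not_lt hj
    simp [h]

theorem pvPred_zero (rows : List (List Int)) (i t : Int) (N : Nat)
    (hrows : ∀ r ∈ rows, r.length = N) (ht : (N : Int) ≤ t) :
    pvPred rows i t = 0 := by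
  unfold pvPred
  apply pv_foldl_if_zero
  intro w _ _
  unfold pvGet2
  cases hq : PySem.List.pyGet? rows (i - w) with
  | none =>
      have h0 : PySem.List.pyGet? ([] : List Int) t = none := by
        rw [PySem.List.pyGet?_eq_none_iff]
        simp only [PySem.Raise.InRange, List.length_nil, Nat.cast_zero]
        omega
      simp [h0]
  | some row =>
      have hlen := hrows row (PySem.List.mem_of_pyGet?_eq_some _ hq)
      have : PySem.List.pyGet? row t = none := by
        rw [PySem.List.pyGet?_eq_none_iff, PySem.Raise.InRange]
        omega
      simp [this]

theorem pvPartial_zero (rows : List (List Int)) (S shift ma c i : Int) :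
    pvPartial rows S shift ma c i 0 = pvZrow S := by
  unfold pvPartial pvZrow
  apply List.map_congr_left
  intro s hs
  rw [PySem.List.mem_pyRange_one] at hs
  have : ¬ (s < 0) := by omega
  simp [this]

-- guarded-true step: cell m receives its predecessor sum
theorem pvPartial_modify (rows : List (List Int)) (S shift ma c i : Int) (m : Nat)
    (hm : (m : Int) < S + 1) (hg : shift ≤ (m : Int) - c ∧ (m : Int) - c ≤ ma + shift) :
    (pvPartial rows S shift ma c i (m : Int)).modify m (· + pvPred rows i ((m : Int) - c))
      = pvPartial rows S shift ma c i ((m : Int) + 1) := by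
  unfold pvPartial
  rw [pv_map_pyRange, pv_map_pyRange, pv_modify_map_range]
  apply List.map_congr_left
  intro k hk
  by_cases hkm : k = m
  · subst hkm
    have h1 : ¬ ((k : Int) < (k : Int) ∧ shift ≤ (k : Int) - c ∧ (k : Int) - c ≤ ma + shift) := by omega
    rw [if_pos rfl, if_neg h1, if_pos (by omega : (k : Int) < (k : Int) + 1 ∧ shift ≤ (k : Int) - c ∧ (k : Int) - c ≤ ma + shift)]
    ring
  · have hne : ((k : Int) < (m : Int) + 1 ∧ shift ≤ (k : Int) - c ∧ (k : Int) - c ≤ ma + shift)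
        ↔ ((k : Int) < (m : Int) ∧ shift ≤ (k : Int) - c ∧ (k : Int) - c ≤ ma + shift) := by
      constructor <;> intro h <;> refine ⟨by omega, h.2⟩
    rw [if_neg hkm]
    by_cases h2 : (k : Int) < (m : Int) ∧ shift ≤ (k : Int) - c ∧ (k : Int) - c ≤ ma + shift
    · rw [if_pos h2, if_pos (hne.mpr h2)]
    · rw [if_neg h2, if_neg (fun h => h2 (hne.mp h))]

-- guarded-false step: nothing changes
theorem pvPartial_skip (rows : List (List Int)) (S shift ma c i : Int) (m : Nat)
    (hg : ¬ (shift ≤ (m : Int) - c ∧ (m : Int) - c ≤ ma + shift)) :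
    pvPartial rows S shift ma c i ((m : Int) + 1) = pvPartial rows S shift ma c i (m : Int) := by
  unfold pvPartial
  apply List.map_congr_left
  intro s _
  by_cases h2 : s < (m : Int) ∧ shift ≤ s - c ∧ s - c ≤ ma + shift
  · rw [if_pos ⟨by omega, h2.2⟩, if_pos h2]
  · have h3 : ¬ (s < (m : Int) + 1 ∧ shift ≤ s - c ∧ s - c ≤ ma + shift) := by
      intro h
      rcases h with ⟨hs, hgs⟩
      by_cases hsm : s = (m : Int)
      · exact hg (hsm ▸ hgs)
      · exact h2 ⟨by omega, hgs⟩
    rw [if_neg h3, if_neg h2]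

-- the inner weights loop, one fixed cell (i, s)
theorem pv_wfold_pos (i s c shift ma : Int) (rows rest : List (List Int))
    (hlen : (rows.length : Int) = i) (hg : shift ≤ s - c ∧ s - c ≤ ma + shift) :
    ∀ (l : List Int), (∀ w ∈ l, 0 < w) → ∀ (r : List Int),
      l.foldl (fun dp w =>
          if i - w < 0 ∨ s - c < shift ∨ s - c > ma + shift then dp
          else pvAdd2 dp i s (pvGet2 dp (i - w) (s - c))) (rows ++ r :: rest)
        = rows ++ (r.modify s.toNat
            (· + l.foldl (fun a w => if 0 ≤ i - w then a + pvGet2 rows (i - w) (s - c) else a) 0)) :: rest := by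
  intro l
  induction l with
  | nil =>
      intro _ r
      simp only [List.foldl_nil]
      rw [pv_modify_add_zero]
  | cons w l ih =>
      intro hl r
      have hw : 0 < w := hl w (by simp)
      have hl' : ∀ w ∈ l, 0 < w := fun w hw' => hl w (by simp [hw'])
      simp only [List.foldl_cons]
      by_cases hiw : i - w < 0
      · rw [if_pos (Or.inl hiw), if_neg (by omega : ¬ 0 ≤ i - w)]
        exact ih hl' r
      · have h0iw : 0 ≤ i - w := by omega
        have hc : ¬ (i - w < 0 ∨ s - c < shift ∨ s - c > ma + shift) := by omega
        rw [if_neg hc, if_pos h0iw,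
          pvGet2_append_left rows (r :: rest) (i - w) (s - c) h0iw (by omega),
          pvAdd2_append rows r rest i s _ hlen, ih hl',
          pv_modify_modify,
          pv_foldl_if_acc l (fun w => 0 ≤ i - w) (fun w => pvGet2 rows (i - w) (s - c))
            (0 + pvGet2 rows (i - w) (s - c))]
        exact congrArg (fun f => rows ++ (r.modify s.toNat f) :: rest) (funext fun x => by ring)

theorem pv_wfold (l : List Int) (hl : ∀ w ∈ l, 0 < w)
    (rows rest : List (List Int)) (r : List Int)
    (i s c shift ma : Int) (hlen : (rows.length : Int) = i) :
    l.foldl (fun dp w =>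
        if i - w < 0 ∨ s - c < shift ∨ s - c > ma + shift then dp
        else pvAdd2 dp i s (pvGet2 dp (i - w) (s - c))) (rows ++ r :: rest)
      = if shift ≤ s - c ∧ s - c ≤ ma + shift
        then rows ++ (r.modify s.toNat
              (· + l.foldl (fun a w => if 0 ≤ i - w then a + pvGet2 rows (i - w) (s - c) else a) 0)) :: rest
        else rows ++ r :: rest := by
  by_cases hg : shift ≤ s - c ∧ s - c ≤ ma + shift
  · rw [if_pos hg]
    exact pv_wfold_pos i s c shift ma rows rest hlen hg l hl r
  · rw [if_neg hg]
    induction l with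
    | nil => simp
    | cons w l ih =>
        simp only [List.foldl_cons]
        rw [if_pos (by omega : i - w < 0 ∨ s - c < shift ∨ s - c > ma + shift)]
        exact ih (fun w hw => hl w (by simp [hw]))

-- the s loop for one row i
theorem pv_sloop (rows rest : List (List Int)) (S shift ma c i : Int)
    (hlen : (rows.length : Int) = i) :
    ∀ (m : Nat), (m : Int) ≤ S + 1 →
      (PySem.List.pyRange 0 (m : Int) 1).foldl
        (fun dp s => pvWts.foldl (fun dp w =>
            if i - w < 0 ∨ s - c < shift ∨ s - c > ma + shift then dp
            else pvAdd2 dp i s (pvGet2 dp (i - w) (s - c))) dp)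
        (rows ++ pvZrow S :: rest)
      = rows ++ pvPartial rows S shift ma c i (m : Int) :: rest := by
  intro m
  induction m with
  | zero =>
      intro _
      simp only [Nat.cast_zero]
      rw [PySem.List.pyRange_one_eq_nil (le_refl 0)]
      simp [pvPartial_zero]
  | succ m ih =>
      intro hm1
      have hm : (m : Int) ≤ S + 1 := by push_cast at hm1 ⊢; omega
      have hcast : ((m + 1 : Nat) : Int) = (m : Int) + 1 := by push_cast; ring
      rw [hcast, PySem.List.pyRange_one_succ_right (Int.natCast_nonneg m),
        List.foldl_append, ih hm]
      simp only [List.foldl_cons, List.foldl_nil]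
      rw [pv_wfold pvWts (by decide) rows rest _ i (m : Int) c shift ma hlen]
      by_cases hg : shift ≤ (m : Int) - c ∧ (m : Int) - c ≤ ma + shift
      · rw [if_pos hg]
        have : ((m : Int)).toNat = m := Int.toNat_natCast m
        rw [this]
        rw [show (fun x : Int => x + pvWts.foldl (fun a w => if 0 ≤ i - w then a + pvGet2 rows (i - w) ((m : Int) - c) else a) 0) = (· + pvPred rows i ((m : Int) - c)) from rfl]
        rw [pvPartial_modify rows S shift ma c i m (by push_cast at hm1; omega) hg]
      · rw [if_neg hg, pvPartial_skip rows S shift ma c i m hg]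

theorem pvPartial_top (rows : List (List Int)) (S shift ma c i : Int) (N : Nat)
    (hsh : 0 ≤ shift) (hN : (N : Int) = S + 1)
    (hrows : ∀ r ∈ rows, r.length = N) :
    pvPartial rows S shift ma c i (S + 1) = pvRowB rows S shift ma c i := by
  unfold pvPartial pvRowB
  apply List.map_congr_left
  intro s hs
  rw [PySem.List.mem_pyRange_one] at hs
  by_cases hg : shift ≤ s - c ∧ s - c ≤ ma + shift
  · rw [if_pos ⟨by omega, hg⟩]
    by_cases hsc : s - c ≤ S
    · rw [if_pos ⟨hg.1, hg.2, hsc⟩,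
        PySem.List.pyGetD_map_pyRange_of_nonneg (fun t => pvPred rows i t) (S + 1) (s - c) 0
          (by omega) (by omega)]
    · rw [if_neg (by tauto)]
      exact pvPred_zero rows i (s - c) N hrows (by omega)
  · rw [if_neg (by tauto), if_neg (by tauto)]

def pvRow0 (S shift : Int) : List Int :=
  (PySem.List.pyRange 0 (S + 1) 1).map (fun s => if s = shift then (1 : Int) else 0)

theorem pv_row0_eq (S shift : Int) (h0 : 0 ≤ shift) :
    (pvZrow S).set shift.toNat 1 = pvRow0 S shift := by
  unfold pvZrow pvRow0
  rw [pv_map_pyRange, pv_map_pyRange]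
  apply List.ext_getElem
  · simp
  intro j h1 h2
  simp only [List.getElem_set, List.getElem_map, List.getElem_range]
  by_cases hj : shift.toNat = j
  · rw [if_pos hj, if_pos (by omega : (j : Int) = shift)]
  · rw [if_neg hj, if_neg (by omega : ¬ (j : Int) = shift)]

theorem pv_dp0_eq (n : Nat) (S shift : Int) (hn : 1 ≤ n) (h0 : 0 ≤ shift) :
    (((PySem.List.pyRange 0 ((n : Nat) : Int) 1).map (fun _ => pvZrow S)).modify 0
        (fun row => row.set shift.toNat 1))
      = pvRow0 S shift :: List.replicate (n - 1) (pvZrow S) := by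
  rw [List.map_const', PySem.List.length_pyRange_one,
    show (((n : Nat) : Int) - 0).toNat = n by omega]
  cases n with
  | zero => omega
  | succ m =>
      rw [List.replicate_succ]
      have hmod : (pvZrow S :: List.replicate m (pvZrow S)).modify 0 (fun row => row.set shift.toNat 1)
          = ((pvZrow S).set shift.toNat 1) :: List.replicate m (pvZrow S) := by
        simp [List.modify]
      rw [hmod, pv_row0_eq S shift h0]
      simp

-- A's per-row step function, as it appears inside the port after zeta reduction
def pvAstep (v' : List Int) (shift p ma : Int) : List (List Int) → Int → List (List Int) :=
  fun dp i => (PySem.List.pyRange 0 (p + shift + 1) 1).foldl (fun dp s =>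
      pvWts.foldl (fun dp w =>
        if i - w < 0 ∨ s - PySem.List.pyGetD v' i 0 < shift ∨ s - PySem.List.pyGetD v' i 0 > ma + shift
        then dp
        else pvAdd2 dp i s (pvGet2 dp (i - w) (s - PySem.List.pyGetD v' i 0))) dp) dp

theorem pvAstep_def (v' : List Int) (shift p ma : Int) :
    pvAstep v' shift p ma = fun dp i => (PySem.List.pyRange 0 (p + shift + 1) 1).foldl (fun dp s =>
      pvWts.foldl (fun dp w =>
        if i - w < 0 ∨ s - PySem.List.pyGetD v' i 0 < shift ∨ s - PySem.List.pyGetD v' i 0 > ma + shift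
        then dp
        else pvAdd2 dp i s (pvGet2 dp (i - w) (s - PySem.List.pyGetD v' i 0))) dp) dp := rfl

-- ---- the pure reference count cnt(i, s) (fuelled; fuel i.toNat + 1 always suffices) ----
def pvCntF (v' : List Int) (shift ma : Int) : Nat → Int → Int → Int
  | 0, _, _ => 0
  | fuel+1, i, s =>
    if i = 0 then (if s = shift then 1 else 0)
    else
      pvWts.foldl (fun a w =>
        if i - w < 0 ∨ s - PySem.List.pyGetD v' i 0 < shift ∨ s - PySem.List.pyGetD v' i 0 > ma + shift
        then a
        else a + pvCntF v' shift ma fuel (i - w) (s - PySem.List.pyGetD v' i 0)) 0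

def pvCnt (v' : List Int) (shift ma : Int) (i s : Int) : Int := pvCntF v' shift ma (i.toNat + 1) i s

theorem pvWts_ge : ∀ w ∈ pvWts, (57:Int) ≤ w := by decide

theorem pvCntF_stable (v' : List Int) (shift ma : Int) :
    ∀ (f1 f2 : Nat) (i s : Int), i.toNat < f1 → i.toNat < f2 →
      pvCntF v' shift ma f1 i s = pvCntF v' shift ma f2 i s := by
  intro f1
  induction f1 with
  | zero => intro f2 i s h1 h2; omega
  | succ f1 ih =>
      intro f2 i s h1 h2
      cases f2 with
      | zero => omega
      | succ f2 =>
          simp only [pvCntF]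
          by_cases hi : i = 0
          · rw [if_pos hi, if_pos hi]
          · rw [if_neg hi, if_neg hi]
            apply PySem.List.foldl_congr_mem
            intro acc w hw
            by_cases hc : i - w < 0 ∨ s - PySem.List.pyGetD v' i 0 < shift ∨
                s - PySem.List.pyGetD v' i 0 > ma + shift
            · rw [if_pos hc, if_pos hc]
            · rw [if_neg hc, if_neg hc]
              have h0 : ¬ (i - w < 0) := fun h => hc (Or.inl h)
              have h57 := pvWts_ge w hw
              have hlt : (i - w).toNat < i.toNat := by omega
              rw [ih f2 (i - w) (s - PySem.List.pyGetD v' i 0) (by omega) (by omega)]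

theorem pvCnt_zero (v' : List Int) (shift ma s : Int) :
    pvCnt v' shift ma 0 s = if s = shift then 1 else 0 := rfl

theorem pvCnt_foldl (v' : List Int) (shift ma i s : Int) (hi : i ≠ 0) :
    pvCnt v' shift ma i s
      = pvWts.foldl (fun a w =>
          if i - w < 0 ∨ s - PySem.List.pyGetD v' i 0 < shift ∨ s - PySem.List.pyGetD v' i 0 > ma + shift
          then a
          else a + pvCnt v' shift ma (i - w) (s - PySem.List.pyGetD v' i 0)) 0 := by
  show pvCntF v' shift ma (i.toNat + 1) i s = _
  simp only [pvCntF]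
  rw [if_neg hi]
  apply PySem.List.foldl_congr_mem
  intro acc w hw
  by_cases hc : i - w < 0 ∨ s - PySem.List.pyGetD v' i 0 < shift ∨
      s - PySem.List.pyGetD v' i 0 > ma + shift
  · rw [if_pos hc, if_pos hc]
  · rw [if_neg hc, if_neg hc]
    have h0 : ¬ (i - w < 0) := fun h => hc (Or.inl h)
    have h57 := pvWts_ge w hw
    rw [pvCntF_stable v' shift ma i.toNat ((i - w).toNat + 1) (i - w)
      (s - PySem.List.pyGetD v' i 0) (by omega) (by omega)]
    rfl

-- positions below the lightest weight (other than 0) have no predecessor: cnt is 0 there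
theorem pvCnt_small (v' : List Int) (shift ma i s : Int) (hi : i ≠ 0) (h57 : i < 57) :
    pvCnt v' shift ma i s = 0 := by
  rw [pvCnt_foldl v' shift ma i s hi]
  exact pv_foldl_skip pvWts _ _ 0
    (fun w hw => Or.inl (by have := pvWts_ge w hw; omega))

-- ---- the ideal table: row i of A's finished dp is [cnt(i, s) for s in range(S+1)] ----
def pvCntRow (v' : List Int) (shift ma S : Int) (i : Int) : List Int :=
  (PySem.List.pyRange 0 (S + 1) 1).map (fun s => pvCnt v' shift ma i s)

def pvIdealT (v' : List Int) (shift ma S : Int) (k : Nat) : List (List Int) :=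
  (List.range (k+1)).map (fun (j : Nat) => pvCntRow v' shift ma S (j : Int))

theorem pv_len_ideal (v' : List Int) (shift ma S : Int) (k : Nat) :
    (pvIdealT v' shift ma S k).length = k + 1 := by simp [pvIdealT]

theorem pv_rows_ideal (v' : List Int) (shift ma S : Int) (k : Nat) :
    ∀ r ∈ pvIdealT v' shift ma S k, r.length = (S + 1).toNat := by
  intro r hr
  simp only [pvIdealT, List.mem_map] at hr
  obtain ⟨j, _, rfl⟩ := hr
  simp [pvCntRow, PySem.List.length_pyRange_one]

theorem pvIdealT_zero (v' : List Int) (shift ma S : Int) :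
    pvIdealT v' shift ma S 0 = [pvCntRow v' shift ma S 0] := by
  simp [pvIdealT]

theorem pvIdealT_succ (v' : List Int) (shift ma S : Int) (k : Nat) :
    pvIdealT v' shift ma S (k+1) = pvIdealT v' shift ma S k ++ [pvCntRow v' shift ma S ((k:Int)+1)] := by
  simp [pvIdealT, List.range_succ]

theorem pvCntRow_zero (v' : List Int) (shift ma S : Int) :
    pvCntRow v' shift ma S 0 = pvRow0 S shift := by
  unfold pvCntRow pvRow0
  apply List.map_congr_left
  intro s _
  exact pvCnt_zero v' shift ma s

theorem pv_row_get (f : Int → Int) (N t : Int) (ht0 : 0 ≤ t) (ht : t < N) :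
    (PySem.List.pyGet? ((PySem.List.pyRange 0 N 1).map f) t).getD 0 = f t := by
  rw [pv_map_pyRange, PySem.List.pyGet?_of_nonneg _ ht0, List.getElem?_map,
    List.getElem?_range (by omega : t.toNat < N.toNat)]
  simp [Int.toNat_of_nonneg ht0]

theorem pvGet2_ideal (v' : List Int) (shift ma S : Int) (k : Nat) (j t : Int)
    (hj0 : 0 ≤ j) (hj : j ≤ (k : Int)) (ht0 : 0 ≤ t) (ht : t ≤ S) :
    pvGet2 (pvIdealT v' shift ma S k) j t = pvCnt v' shift ma j t := by
  have h1 : (pvIdealT v' shift ma S k)[j.toNat]? = some (pvCntRow v' shift ma S ((j.toNat : Nat) : Int)) := by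
    have hm : j.toNat < (pvIdealT v' shift ma S k).length := by rw [pv_len_ideal]; omega
    rw [List.getElem?_eq_getElem hm]
    simp only [pvIdealT, List.getElem_map, List.getElem_range]
  unfold pvGet2
  rw [PySem.List.pyGet?_of_nonneg _ hj0, h1]
  simp only [Option.getD_some]
  rw [Int.toNat_of_nonneg hj0]
  unfold pvCntRow
  exact pv_row_get (pvCnt v' shift ma j) (S + 1) t ht0 (by omega)

theorem pvPred_ideal (v' : List Int) (shift ma S : Int) (k : Nat) (t : Int)
    (ht0 : 0 ≤ t) (ht : t ≤ S) :
    pvPred (pvIdealT v' shift ma S k) ((k:Int)+1) t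
      = pvWts.foldl (fun a w => if 0 ≤ ((k:Int)+1) - w then a + pvCnt v' shift ma (((k:Int)+1) - w) t else a) 0 := by
  unfold pvPred
  apply PySem.List.foldl_congr_mem
  intro a w hw
  by_cases h0 : 0 ≤ ((k:Int)+1) - w
  · rw [if_pos h0, if_pos h0]
    have h57 := pvWts_ge w hw
    rw [pvGet2_ideal v' shift ma S k (((k:Int)+1) - w) t h0 (by omega) ht0 ht]
  · rw [if_neg h0, if_neg h0]

-- the filled row A produces from the ideal prefix IS the ideal row, given the Pre_-derived bound HcS
theorem pv_rowB_eq_cntRow (v' : List Int) (shift ma p : Int) (k : Nat)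
    (hsh : 0 ≤ shift)
    (HcS : ∀ s : Int, 0 ≤ s → s ≤ p + shift →
      shift ≤ s - PySem.List.pyGetD v' ((k:Int)+1) 0 →
      s - PySem.List.pyGetD v' ((k:Int)+1) 0 ≤ ma + shift →
      s - PySem.List.pyGetD v' ((k:Int)+1) 0 ≤ p + shift ∨ ((k:Int)+1) < 57) :
    pvRowB (pvIdealT v' shift ma (p+shift) k) (p+shift) shift ma
        (PySem.List.pyGetD v' ((k:Int)+1) 0) ((k:Int)+1)
      = pvCntRow v' shift ma (p+shift) ((k:Int)+1) := by
  unfold pvRowB pvCntRow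
  apply List.map_congr_left
  intro s hs
  rw [PySem.List.mem_pyRange_one] at hs
  rw [pvCnt_foldl v' shift ma ((k:Int)+1) s (by omega)]
  by_cases hG : shift ≤ s - PySem.List.pyGetD v' ((k:Int)+1) 0 ∧
      s - PySem.List.pyGetD v' ((k:Int)+1) 0 ≤ ma + shift
  · by_cases hsc : s - PySem.List.pyGetD v' ((k:Int)+1) 0 ≤ p + shift
    · rw [if_pos ⟨hG.1, hG.2, hsc⟩,
        PySem.List.pyGetD_map_pyRange_of_nonneg (fun t => pvPred (pvIdealT v' shift ma (p+shift) k) ((k:Int)+1) t)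
          (p + shift + 1) (s - PySem.List.pyGetD v' ((k:Int)+1) 0) 0 (by omega) (by omega),
        pvPred_ideal v' shift ma (p+shift) k (s - PySem.List.pyGetD v' ((k:Int)+1) 0) (by omega) (by omega)]
      apply PySem.List.foldl_congr_mem
      intro a w hw
      by_cases h0 : 0 ≤ ((k:Int)+1) - w
      · rw [if_pos h0, if_neg (by omega :
          ¬ (((k:Int)+1) - w < 0 ∨ s - PySem.List.pyGetD v' ((k:Int)+1) 0 < shift ∨
             s - PySem.List.pyGetD v' ((k:Int)+1) 0 > ma + shift))]
      · rw [if_neg h0, if_pos (Or.inl (by omega : ((k:Int)+1) - w < 0))]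
    · rw [if_neg (by tauto)]
      rcases HcS s (by omega) (by omega) hG.1 hG.2 with h | h
      · exact absurd h hsc
      · exact (pv_foldl_skip pvWts
          (fun w => ((k:Int)+1) - w < 0 ∨ s - PySem.List.pyGetD v' ((k:Int)+1) 0 < shift ∨
            s - PySem.List.pyGetD v' ((k:Int)+1) 0 > ma + shift)
          (fun w => pvCnt v' shift ma (((k:Int)+1) - w) (s - PySem.List.pyGetD v' ((k:Int)+1) 0)) 0
          (fun w hw => Or.inl (by have := pvWts_ge w hw; omega))).symm
  · rw [if_neg (by tauto)]
    push Not at hG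
    exact (pv_foldl_skip pvWts
      (fun w => ((k:Int)+1) - w < 0 ∨ s - PySem.List.pyGetD v' ((k:Int)+1) 0 < shift ∨
        s - PySem.List.pyGetD v' ((k:Int)+1) 0 > ma + shift)
      (fun w => pvCnt v' shift ma (((k:Int)+1) - w) (s - PySem.List.pyGetD v' ((k:Int)+1) 0)) 0
      (fun w hw => by omega)).symm

-- A's outer loop invariant: after the first k rows, dp is the ideal prefix followed by zero rows
theorem pv_outer (v' : List Int) (shift p ma : Int)
    (hsh : 0 ≤ shift) (hp : 0 ≤ p) (hL : 1 ≤ v'.length)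
    (HC : ¬ ma ≤ p → ∀ x ∈ v'.drop 57, x < -(ma + shift) ∨ 0 ≤ x) :
    ∀ k : Nat, k ≤ v'.length - 1 →
      (PySem.List.pyRange 1 (1 + (k:Int)) 1).foldl (pvAstep v' shift p ma)
        (pvRow0 (p+shift) shift :: List.replicate (v'.length - 1) (pvZrow (p+shift)))
      = pvIdealT v' shift ma (p+shift) k ++ List.replicate (v'.length - 1 - k) (pvZrow (p+shift)) := by
  intro k
  induction k with
  | zero =>
      intro _
      rw [show (1:Int) + ((0:Nat):Int) = 1 by norm_num, PySem.List.pyRange_one_eq_nil (le_refl 1)]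
      rw [pvIdealT_zero, pvCntRow_zero]
      simp
  | succ k ih =>
      intro hk1
      have hk : k ≤ v'.length - 1 := by omega
      have hcast : (1:Int) + ((k+1:Nat):Int) = (1 + (k:Int)) + 1 := by push_cast; ring
      rw [hcast, PySem.List.pyRange_one_succ_right (by omega : (1:Int) ≤ 1 + (k:Int)),
        List.foldl_append, ih hk]
      simp only [List.foldl_cons, List.foldl_nil]
      have hrep : v'.length - 1 - k = (v'.length - 1 - (k+1)) + 1 := by omega
      rw [hrep, List.replicate_succ]
      have hlen : ((pvIdealT v' shift ma (p+shift) k).length : Int) = 1 + (k:Int) := by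
        rw [pv_len_ideal]; push_cast; ring
      -- the Pre_-derived per-row bound
      have HcS : ∀ s : Int, 0 ≤ s → s ≤ p + shift →
          shift ≤ s - PySem.List.pyGetD v' ((k:Int)+1) 0 →
          s - PySem.List.pyGetD v' ((k:Int)+1) 0 ≤ ma + shift →
          s - PySem.List.pyGetD v' ((k:Int)+1) 0 ≤ p + shift ∨ ((k:Int)+1) < 57 := by
        intro s hs0 hsS hg1 hg2
        by_cases hmp : ma ≤ p
        · left; omega
        · by_cases hk57 : ((k:Int)+1) < 57
          · right; exact hk57
          · have hki : k + 1 < v'.length := by omega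
            have hcv : PySem.List.pyGetD v' ((k:Int)+1) 0 = v'[k+1] := by
              rw [PySem.List.pyGetD_eq_getElem v' 0 (by omega) (by omega)]
              simp only [show ((k:Int) + 1).toNat = k + 1 from by omega]
            have hmem : v'[k+1] ∈ v'.drop 57 := by
              have hlt : k + 1 - 57 < (v'.drop 57).length := by
                rw [List.length_drop]; omega
              refine List.mem_iff_getElem.mpr ⟨k + 1 - 57, hlt, ?_⟩
              rw [List.getElem_drop]
              congr 1
              omega
            rcases HC hmp _ hmem with h | h
            · exfalso; rw [hcv] at hg2; omega
            · left; rw [hcv]; rw [hcv] at hg1 hg2; omega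
      have hA : pvAstep v' shift p ma
            (pvIdealT v' shift ma (p+shift) k ++ pvZrow (p+shift)
              :: List.replicate (v'.length - 1 - (k+1)) (pvZrow (p+shift)))
            (1 + (k:Int))
          = pvIdealT v' shift ma (p+shift) k ++ pvCntRow v' shift ma (p+shift) ((k:Int)+1)
              :: List.replicate (v'.length - 1 - (k+1)) (pvZrow (p+shift)) := by
        unfold pvAstep
        have hbound : (p + shift + 1 : Int) = (((p + shift + 1).toNat : Nat) : Int) := by omega
        rw [hbound,
          pv_sloop (pvIdealT v' shift ma (p+shift) k) _ (p+shift) shift ma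
            (PySem.List.pyGetD v' (1 + (k:Int)) 0) (1 + (k:Int)) hlen (p + shift + 1).toNat (by omega),
          ← hbound,
          pvPartial_top _ (p+shift) shift ma _ _ (p + shift + 1).toNat hsh (by omega)
            (pv_rows_ideal v' shift ma (p+shift) k)]
        rw [show (1 + (k:Int)) = ((k:Int)+1) by ring]
        rw [pv_rowB_eq_cntRow v' shift ma p k hsh HcS]
      rw [hA, show pvIdealT v' shift ma (p+shift) k ++ pvCntRow v' shift ma (p+shift) ((k:Int)+1)
              :: List.replicate (v'.length - 1 - (k+1)) (pvZrow (p+shift))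
            = (pvIdealT v' shift ma (p+shift) k ++ [pvCntRow v' shift ma (p+shift) ((k:Int)+1)])
              ++ List.replicate (v'.length - 1 - (k+1)) (pvZrow (p+shift)) by simp,
        ← pvIdealT_succ]

-- ---- B side: the memoized recursion computes cnt ----
def pvInv (v' : List Int) (shift ma : Int) (memo : Std.HashMap (Int × Int) Int) : Prop :=
  ∀ i s r, memo[((i, s) : Int × Int)]? = some r → r = pvCnt v' shift ma i s

theorem pv_countL_spec (v' : List Int) (shift ma : Int) (n : Nat)
    (IH : ∀ (j t : Int) (m : Std.HashMap (Int × Int) Int), j.toNat < n → pvInv v' shift ma m →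
      (pvCountM v' shift ma j t m).1 = pvCnt v' shift ma j t ∧
      pvInv v' shift ma (pvCountM v' shift ma j t m).2)
    (i s c : Int) (hi : i.toNat ≤ n) :
    ∀ (ws : List Int) (hws : ∀ x ∈ ws, (57:Int) ≤ x) (total : Int)
      (memo : Std.HashMap (Int × Int) Int), pvInv v' shift ma memo →
      (pvCountL v' shift ma i s c ws hws total memo).1
        = ws.foldl (fun a w =>
            if i - w < 0 ∨ s - c < shift ∨ s - c > ma + shift then a
            else a + pvCnt v' shift ma (i - w) (s - c)) total
      ∧ pvInv v' shift ma (pvCountL v' shift ma i s c ws hws total memo).2 := by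
  intro ws
  induction ws with
  | nil =>
      intro hws total memo hm
      simp only [pvCountL, List.foldl_nil]
      exact ⟨trivial, hm⟩
  | cons w rest ihw =>
      intro hws total memo hm
      simp only [pvCountL, List.foldl_cons]
      by_cases hc : i - w < 0 ∨ s - c < shift ∨ s - c > ma + shift
      · rw [if_pos hc, if_pos hc]
        exact ihw _ total memo hm
      · rw [if_neg hc, if_neg hc]
        have h0 : ¬ (i - w < 0) := fun h => hc (Or.inl h)
        have h57 : (57:Int) ≤ w := hws w (by simp)
        have hjlt : (i - w).toNat < n := by omega
        obtain ⟨hv1, hv2⟩ := IH (i - w) (s - c) memo hjlt hm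
        rw [hv1]
        exact ihw _ _ _ hv2

theorem pv_countM_spec (v' : List Int) (shift ma : Int) :
    ∀ (n : Nat) (i s : Int) (memo : Std.HashMap (Int × Int) Int), i.toNat ≤ n →
      pvInv v' shift ma memo →
      (pvCountM v' shift ma i s memo).1 = pvCnt v' shift ma i s ∧
      pvInv v' shift ma (pvCountM v' shift ma i s memo).2 := by
  intro n
  induction n using Nat.strong_induction_on with
  | _ n SIH =>
      intro i s memo hi hm
      rw [pvCountM]
      by_cases hi0 : i = 0
      · rw [if_pos hi0]
        subst hi0
        exact ⟨(pvCnt_zero v' shift ma s).symm, hm⟩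
      · rw [if_neg hi0]
        by_cases hi57 : i < 57
        · rw [if_pos hi57]
          exact ⟨(pvCnt_small v' shift ma i s hi0 hi57).symm, hm⟩
        rw [if_neg hi57]
        cases hmem : memo[((i, s) : Int × Int)]? with
        | some r => exact ⟨hm i s r hmem, hm⟩
        | none =>
            simp only []
            have hIH : ∀ (j t : Int) (m : Std.HashMap (Int × Int) Int), j.toNat < n →
                pvInv v' shift ma m →
                (pvCountM v' shift ma j t m).1 = pvCnt v' shift ma j t ∧
                pvInv v' shift ma (pvCountM v' shift ma j t m).2 := by
              intro j t m hj hmInv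
              exact SIH j.toNat hj j t m (le_refl _) hmInv
            obtain ⟨hv, hInv⟩ := pv_countL_spec v' shift ma n hIH i s
              (PySem.List.pyGetD v' i 0) hi pvWts (by decide) 0 memo hm
            constructor
            · show (pvCountL v' shift ma i s (PySem.List.pyGetD v' i 0) pvWts (by decide) 0 memo).1 = _
              rw [hv]
              exact (pvCnt_foldl v' shift ma i s hi0).symm
            · intro i' s' r hg
              show r = _
              rw [Std.HashMap.getElem?_insert] at hg
              by_cases heq : ((i, s) : Int × Int) = (i', s')
              · rw [if_pos (by simp [heq])] at hg
                have h1 : i' = i := (congrArg Prod.fst heq).symm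
                have h2 : s' = s := (congrArg Prod.snd heq).symm
                subst h1; subst h2
                rw [← Option.some_inj.mp hg, hv]
                exact (pvCnt_foldl v' shift ma i' s' hi0).symm
              · rw [if_neg (by simpa using heq)] at hg
                exact hInv i' s' r hg

-- B's comprehension building the last row
theorem pv_buildRow_spec (v' : List Int) (shift ma : Int) (nIdx : Int) :
    ∀ (l acc : List Int) (memo : Std.HashMap (Int × Int) Int), pvInv v' shift ma memo →
      (pvBuildRow v' shift ma nIdx l acc memo).1
        = acc.reverse ++ l.map (fun s => pvCnt v' shift ma nIdx s)
      ∧ pvInv v' shift ma (pvBuildRow v' shift ma nIdx l acc memo).2 := by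
  intro l
  induction l with
  | nil => intro acc memo hm; exact ⟨by simp [pvBuildRow], hm⟩
  | cons s rest ih =>
      intro acc memo hm
      obtain ⟨hv, hInv⟩ := pv_countM_spec v' shift ma nIdx.toNat nIdx s memo (le_refl _) hm
      obtain ⟨h1, h2⟩ := ih _ _ hInv
      simp only [pvBuildRow, List.map_cons]
      refine ⟨?_, h2⟩
      rw [h1, hv]
      simp

theorem pv_get2_last (v' : List Int) (shift ma S : Int) (k : Nat) (idx : Int) :
    pvGet2 (pvIdealT v' shift ma S k) (k : Int) idx
      = (PySem.List.pyGet? (pvCntRow v' shift ma S (k : Int)) idx).getD 0 := by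
  unfold pvGet2
  rw [PySem.List.pyGet?_of_nonneg _ (Int.natCast_nonneg k), Int.toNat_natCast]
  have h1 : (pvIdealT v' shift ma S k)[k]? = some (pvCntRow v' shift ma S (k : Int)) := by
    unfold pvIdealT
    rw [List.getElem?_eq_getElem (by simp)]
    simp [List.getElem_map, List.getElem_range]
  rw [h1]
  rfl

-- ===== VERDICT (by name: the statement is the Claim_ definition above) =====
theorem spectral_dictionary_size_spec : Claim_equal_spectral_dictionary_size := by
  unfold Claim_equal_spectral_dictionary_size
  intro v th ma _ hpre
  unfold Spec_spectral_dictionary_size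
  simp only [spectral_dictionary_size, spectral_dictionary_size_alt]
  rw [pv_pair_fold (0 :: v) 0 0]
  simp only [zero_add]
  rw [pv_shift_fold (0 :: v) 0, pv_pos_fold (0 :: v) 0]
  simp only [zero_add]
  set v' := 0 :: v with hv'
  set shift := pvShift v' with hshd
  set p := pvPos v' with hpd
  have hsh : 0 ≤ shift := pvShift_nonneg v'
  have hp : 0 ≤ p := pvPos_nonneg v'
  have hL1 : 1 ≤ v'.length := by rw [hv', List.length_cons]; omega
  simp only [show (List.map (fun _ : Int => (0 : Int)) (PySem.List.pyRange 0 (p + shift + 1) 1))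
      = pvZrow (p + shift) from rfl]
  rw [pv_dp0_eq v'.length (p + shift) shift hL1 hsh]
  rw [← pvAstep_def v' shift p ma]
  have hsv : shift = pvShift v := by rw [hshd, hv']; simp [pvShift]
  have hpv : p = pvPos v := by rw [hpd, hv']; simp [pvPos]
  have HC : ¬ ma ≤ p → ∀ x ∈ v'.drop 57, x < -(ma + shift) ∨ 0 ≤ x := by
    intro hmp x hx
    rw [hsv]
    refine hpre.2 (by omega) x ?_
    rw [hv'] at hx
    simpa using hx
  have hran : ((v'.length : Nat) : Int) = 1 + ((v'.length - 1 : Nat) : Int) := by omega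
  rw [hran]
  rw [pv_outer v' shift p ma hsh hp hL1 HC (v'.length - 1) (le_refl _)]
  simp only [Nat.sub_self, List.replicate_zero, List.append_nil]
  simp only [show (1 + ((v'.length - 1 : Nat) : Int) - 1) = (v'.length : Int) - 1 from by omega]
  obtain ⟨hbuild, -⟩ := pv_buildRow_spec v' shift ma ((v'.length : Int) - 1)
    (PySem.List.pyRange 0 (p + shift + 1) 1) [] ∅ (by intro i s r hg; simp at hg)
  simp only [List.reverse_nil, List.nil_append] at hbuild
  rw [hbuild]
  have hrow : ∀ idx : Int,
      pvGet2 (pvIdealT v' shift ma (p + shift) (v'.length - 1)) ((v'.length : Int) - 1) idx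
        = (PySem.List.pyGet? ((PySem.List.pyRange 0 (p + shift + 1) 1).map
            (fun s => pvCnt v' shift ma ((v'.length : Int) - 1) s)) idx).getD 0 := by
    intro idx
    have hc2 : ((v'.length - 1 : Nat) : Int) = (v'.length : Int) - 1 := by omega
    rw [← hc2, pv_get2_last]
    unfold pvCntRow
    rw [hc2]
  simp only [hrow]
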